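-- pv_equiv track=rewrite | github.com/yewon129/Baekjoon | 프로그래머스/lv0/120956. 옹알이 （1）/옹알이 （1）.py | solution
-- ===== SOURCE A (Python) =====
-- def solution(babbling):
--     answer = 0
--     for word in babbling:
--         flag = 1
--         while word:
--             if word[0] == "a":
--                 if len(word) >= 3 and word[1] == "y" and word[2] == "a":
--                     if len(word) == 3:
--                         word = ""
--                     else:
--                         word = word[3:]
--                 else:
--                     flag = 0
--                     break
--             elif word[0] == "y":
--                 if len(word) >= 2 and word[1] == "e":
--                     if len(word) == 2:
--                         word = ""
--                     else:
--                         word = word[2:]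
--                 else:
--                     flag = 0
--                     break
--             elif word[0] == "w":
--                 if len(word) >= 3 and word[1] == "o" and word[2] == "o":
--                     if len(word) == 3:
--                         word = ""
--                     else:
--                         word = word[3:]
--                 else:
--                     flag = 0
--                     break
--             elif word[0] == "m":
--                 if len(word) >= 2 and word[1] == "a":
--                     if len(word) == 2:
--                         word = ""
--                     else:
--                         word = word[2:]
--                 else:
--                     flag = 0
--                     break
--             else:
--                 flag = 0
--                 break
--         if flag == 1:
--             answer += 1
--     return answer
-- ===== SOURCE B (Python) =====
-- def solution(babbling):
--     # DP over prefixes: ok[i] == True iff word[:i] is a concatenation of allowed sounds.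
--     tokens = ("aya", "ye", "woo", "ma")
--     answer = 0
--     for word in babbling:
--         n = len(word)
--         ok = [True]
--         for i in range(1, n + 1):
--             ok.append(any(len(t) <= i and ok[i - len(t)] and word[i - len(t):i] == t
--                           for t in tokens))
--         answer += 1 if ok[n] else 0
--     return answer
-- ===== Notes on version B (the rewrite author's own statement) =====
-- stated objective: alternative
-- what changed: Replaces A's greedy in-place prefix parser (a while loop that slices tokens off the front of the word) with a dynamic-programming table ok[0..n] marking which prefixes decompose into allowed sounds, filled by peeling candidate tokens off the right end of each prefix.
import Mathlib
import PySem

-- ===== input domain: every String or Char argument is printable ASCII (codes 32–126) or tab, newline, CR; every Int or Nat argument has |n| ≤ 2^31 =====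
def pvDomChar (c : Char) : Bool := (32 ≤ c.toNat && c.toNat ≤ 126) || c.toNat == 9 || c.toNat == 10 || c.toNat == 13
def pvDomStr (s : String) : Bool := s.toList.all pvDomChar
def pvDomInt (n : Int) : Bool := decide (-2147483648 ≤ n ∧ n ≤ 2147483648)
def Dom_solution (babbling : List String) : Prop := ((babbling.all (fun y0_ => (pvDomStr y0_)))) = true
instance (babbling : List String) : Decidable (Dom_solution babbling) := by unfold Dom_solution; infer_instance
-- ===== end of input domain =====

-- B replaces A's greedy front-slicing while-loop parser by a dynamic-programming table over the
-- prefixes of each word (an alternative algorithm of similar cost); return values proved equal.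

-- ===== PORT A =====
-- the body of A's `while word:` loop; the returned Int is the final value of `flag`
def pvALoop (w : List Char) : Int :=
  if w = [] then 1
  else if PySem.List.pyGet? w 0 = some 'a' then
    (if 3 ≤ w.length ∧ PySem.List.pyGet? w 1 = some 'y' ∧ PySem.List.pyGet? w 2 = some 'a' then
      (if w.length = 3 then pvALoop [] else pvALoop (PySem.List.slice w (some 3) none))
    else 0)
  else if PySem.List.pyGet? w 0 = some 'y' then
    (if 2 ≤ w.length ∧ PySem.List.pyGet? w 1 = some 'e' then
      (if w.length = 2 then pvALoop [] else pvALoop (PySem.List.slice w (some 2) none))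
    else 0)
  else if PySem.List.pyGet? w 0 = some 'w' then
    (if 3 ≤ w.length ∧ PySem.List.pyGet? w 1 = some 'o' ∧ PySem.List.pyGet? w 2 = some 'o' then
      (if w.length = 3 then pvALoop [] else pvALoop (PySem.List.slice w (some 3) none))
    else 0)
  else if PySem.List.pyGet? w 0 = some 'm' then
    (if 2 ≤ w.length ∧ PySem.List.pyGet? w 1 = some 'a' then
      (if w.length = 2 then pvALoop [] else pvALoop (PySem.List.slice w (some 2) none))
    else 0)
  else 0
termination_by w.length
decreasing_by
  all_goals simp_all [List.length_pos_iff]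
  all_goals (simp [PySem.List.slice, PySem.List.clampIdx]; omega)

def solution (babbling : List String) : Int :=
  babbling.foldl (fun answer word =>
    let flag := pvALoop word.toList
    answer + (if flag = 1 then 1 else 0)) 0

-- ===== PORT B =====
def pvTokens : List (List Char) := [['a','y','a'], ['y','e'], ['w','o','o'], ['m','a']]

-- body of B's inner `for i in range(1, n+1)` loop: ok.append(any(... for t in tokens)).
-- ok[i - len(t)] is evaluated only under the preceding guard len(t) <= i, so the index is always
-- in range; it is ported with pyGetD (default value never used).
def pvStep (w : List Char) (ok : List Bool) (i : Int) : List Bool :=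
  ok ++ [pvTokens.any (fun t =>
      decide ((t.length : Int) ≤ i) &&
      PySem.List.pyGetD ok (i - (t.length : Int)) false &&
      (PySem.List.slice w (some (i - (t.length : Int))) (some i) == t))]

def pvDpWord (w : List Char) : Bool :=
  let n : Int := (w.length : Int)
  let ok := (PySem.List.pyRange 1 (n + 1) 1).foldl (pvStep w) [true]
  PySem.List.pyGetD ok n false

def solution_alt (babbling : List String) : Int :=
  babbling.foldl (fun answer word =>
    answer + (if pvDpWord word.toList then 1 else 0)) 0

-- ===== PRECONDITION & SPEC =====
def Spec_solution (babbling : List String) (out : Int) : Prop := out = solution_alt babbling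
instance (babbling : List String) (out : Int) : Decidable (Spec_solution babbling out) := by unfold Spec_solution; infer_instance

-- ===== CLAIM (what is proved, stated in full; the proofs are below) =====
def Claim_equal_solution : Prop := ∀ (babbling : List String), Dom_solution babbling → Spec_solution babbling (solution babbling)

-- ===== LEMMAS AND PROOFS =====

-- the language of the task — concatenations of "aya", "ye", "woo", "ma" — as a
-- structural boolean recognizer (the token set is a prefix code, so greedy works) …
def pvGood : List Char → Bool
  | [] => true
  | 'a'::'y'::'a'::t => pvGood t
  | 'y'::'e'::t => pvGood t
  | 'w'::'o'::'o'::t => pvGood t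
  | 'm'::'a'::t => pvGood t
  | _ => false

-- … and as an inductive predicate
inductive PvDecomp : List Char → Prop
  | nil : PvDecomp []
  | aya {t : List Char} : PvDecomp t → PvDecomp ('a'::'y'::'a'::t)
  | ye {t : List Char} : PvDecomp t → PvDecomp ('y'::'e'::t)
  | woo {t : List Char} : PvDecomp t → PvDecomp ('w'::'o'::'o'::t)
  | ma {t : List Char} : PvDecomp t → PvDecomp ('m'::'a'::t)

theorem pvGood_iff (w : List Char) : pvGood w = true ↔ PvDecomp w := by
  induction w using pvGood.induct with
  | case1 => simpa [pvGood] using PvDecomp.nil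
  | case2 t ih => constructor
                  · intro h; exact .aya (ih.mp (by simpa [pvGood] using h))
                  · intro h; cases h with | aya h' => simpa [pvGood] using ih.mpr h'
  | case3 t ih => constructor
                  · intro h; exact .ye (ih.mp (by simpa [pvGood] using h))
                  · intro h; cases h with | ye h' => simpa [pvGood] using ih.mpr h'
  | case4 t ih => constructor
                  · intro h; exact .woo (ih.mp (by simpa [pvGood] using h))
                  · intro h; cases h with | woo h' => simpa [pvGood] using ih.mpr h'
  | case5 t ih => constructor
                  · intro h; exact .ma (ih.mp (by simpa [pvGood] using h))
                  · intro h; cases h with | ma h' => simpa [pvGood] using ih.mpr h'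
  | case6 w h1 h2 h3 h4 h5 =>
      constructor
      · intro h
        rw [pvGood.eq_def] at h
        split at h <;> simp_all
      · intro h
        cases h
        exacts [(h1 rfl).elim, (h2 _ rfl).elim, (h3 _ rfl).elim, (h4 _ rfl).elim, (h5 _ rfl).elim]

theorem pvDecomp_append {u v : List Char} (hu : PvDecomp u) (hv : PvDecomp v) :
    PvDecomp (u ++ v) := by
  induction hu with
  | nil => exact hv
  | aya _ ih => exact .aya ih
  | ye _ ih => exact .ye ih
  | woo _ ih => exact .woo ih
  | ma _ ih => exact .ma ih

theorem pvToken_decomp {t : List Char} (ht : t ∈ pvTokens) : PvDecomp t := by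
  simp [pvTokens] at ht
  rcases ht with rfl | rfl | rfl | rfl
  · exact .aya .nil
  · exact .ye .nil
  · exact .woo .nil
  · exact .ma .nil

theorem pvToken_len {t : List Char} (ht : t ∈ pvTokens) : t.length = 2 ∨ t.length = 3 := by
  simp [pvTokens] at ht
  rcases ht with rfl | rfl | rfl | rfl <;> simp

theorem pvDecomp_peel {w : List Char} (hw : PvDecomp w) (hne : w ≠ []) :
    ∃ u t, t ∈ pvTokens ∧ PvDecomp u ∧ w = u ++ t := by
  induction hw with
  | nil => exact absurd rfl hne
  | aya hs ih =>
    rename_i s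
    by_cases h : s = []
    · subst h; exact ⟨[], ['a','y','a'], by simp [pvTokens], .nil, rfl⟩
    · obtain ⟨u, t, ht, hu, rfl⟩ := ih h
      exact ⟨'a'::'y'::'a'::u, t, ht, .aya hu, by simp⟩
  | ye hs ih =>
    rename_i s
    by_cases h : s = []
    · subst h; exact ⟨[], ['y','e'], by simp [pvTokens], .nil, rfl⟩
    · obtain ⟨u, t, ht, hu, rfl⟩ := ih h
      exact ⟨'y'::'e'::u, t, ht, .ye hu, by simp⟩
  | woo hs ih =>
    rename_i s
    by_cases h : s = []
    · subst h; exact ⟨[], ['w','o','o'], by simp [pvTokens], .nil, rfl⟩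
    · obtain ⟨u, t, ht, hu, rfl⟩ := ih h
      exact ⟨'w'::'o'::'o'::u, t, ht, .woo hu, by simp⟩
  | ma hs ih =>
    rename_i s
    by_cases h : s = []
    · subst h; exact ⟨[], ['m','a'], by simp [pvTokens], .nil, rfl⟩
    · obtain ⟨u, t, ht, hu, rfl⟩ := ih h
      exact ⟨'m'::'a'::u, t, ht, .ma hu, by simp⟩

theorem pyget_cons_one (c : Char) (r : List Char) : PySem.List.pyGet? (c::r) 1 = r[0]? := by
  have := PySem.List.pyGet?_natCast (xs := c::r) (n := 1)
  simpa using this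

theorem pyget_cons_two (c : Char) (r : List Char) : PySem.List.pyGet? (c::r) 2 = r[1]? := by
  have := PySem.List.pyGet?_natCast (xs := c::r) (n := 2)
  simpa using this

theorem slice3_cons (c1 c2 c3 : Char) (t : List Char) :
    PySem.List.slice (c1::c2::c3::t) (some 3) none = t := by
  simp [PySem.List.slice, PySem.List.clampIdx]

theorem slice2_cons (c1 c2 : Char) (t : List Char) :
    PySem.List.slice (c1::c2::t) (some 2) none = t := by
  simp [PySem.List.slice, PySem.List.clampIdx]

-- A's while loop accepts exactly the words of the language
theorem pvALoop_eq (w : List Char) : pvALoop w = if pvGood w then 1 else 0 := by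
  fun_induction pvALoop w with
  | case1 => simp [pvGood]
  | case2 x hne h0 h1 hl _ =>
      obtain ⟨h3, hy, hz⟩ := h1
      rcases x with _ | ⟨c1, _ | ⟨c2, _ | ⟨c3, t⟩⟩⟩ <;> simp at h3 hl ⊢ <;> try omega
      obtain rfl : c1 = 'a' := by simpa using h0
      rw [pyget_cons_one] at hy; rw [pyget_cons_two] at hz
      obtain rfl : c2 = 'y' := by simpa using hy
      obtain rfl : c3 = 'a' := by simpa using hz
      obtain rfl : t = [] := by simpa using hl
      simp [pvALoop, pvGood]
  | case3 x hne h0 h1 hl ih1 =>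
      obtain ⟨h3, hy, hz⟩ := h1
      rcases x with _ | ⟨c1, _ | ⟨c2, _ | ⟨c3, t⟩⟩⟩ <;> simp at h3 ⊢ <;> try omega
      obtain rfl : c1 = 'a' := by simpa using h0
      rw [pyget_cons_one] at hy; rw [pyget_cons_two] at hz
      obtain rfl : c2 = 'y' := by simpa using hy
      obtain rfl : c3 = 'a' := by simpa using hz
      rw [slice3_cons] at ih1 ⊢
      simpa [pvGood] using ih1
  | case4 x hne h0 h =>
      rcases x with _ | ⟨c1, r⟩
      · exact absurd rfl hne
      obtain rfl : c1 = 'a' := by simpa using h0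
      rw [pyget_cons_one, pyget_cons_two] at h
      suffices hg : pvGood ('a'::r) = false by simp [hg]
      apply Bool.eq_false_iff.mpr
      intro hg
      rcases (pvGood_iff _).mp hg with _ | h' | h' | h' | h' <;> simp_all
  | case5 x hne hna h0 h1 hl =>
      obtain ⟨h2, he⟩ := h1
      rcases x with _ | ⟨c1, _ | ⟨c2, t⟩⟩ <;> simp at h2 hl ⊢ <;> try omega
      obtain rfl : c1 = 'y' := by simpa using h0
      rw [pyget_cons_one] at he
      obtain rfl : c2 = 'e' := by simpa using he
      obtain rfl : t = [] := by simpa using hl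
      simp [pvALoop, pvGood]
  | case6 x hne hna h0 h1 hl ih1 =>
      obtain ⟨h2, he⟩ := h1
      rcases x with _ | ⟨c1, _ | ⟨c2, t⟩⟩ <;> simp at h2 ⊢ <;> try omega
      obtain rfl : c1 = 'y' := by simpa using h0
      rw [pyget_cons_one] at he
      obtain rfl : c2 = 'e' := by simpa using he
      rw [slice2_cons] at ih1 ⊢
      simpa [pvGood] using ih1
  | case7 x hne hna h0 h =>
      rcases x with _ | ⟨c1, r⟩
      · exact absurd rfl hne
      obtain rfl : c1 = 'y' := by simpa using h0
      rw [pyget_cons_one] at h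
      suffices hg : pvGood ('y'::r) = false by simp [hg]
      apply Bool.eq_false_iff.mpr
      intro hg
      rcases (pvGood_iff _).mp hg with _ | h' | h' | h' | h' <;> simp_all
  | case8 x hne hna hny h0 h1 hl =>
      obtain ⟨h3, h2o, h3o⟩ := h1
      rcases x with _ | ⟨c1, _ | ⟨c2, _ | ⟨c3, t⟩⟩⟩ <;> simp at h3 hl ⊢ <;> try omega
      obtain rfl : c1 = 'w' := by simpa using h0
      rw [pyget_cons_one] at h2o; rw [pyget_cons_two] at h3o
      obtain rfl : c2 = 'o' := by simpa using h2o
      obtain rfl : c3 = 'o' := by simpa using h3o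
      obtain rfl : t = [] := by simpa using hl
      simp [pvALoop, pvGood]
  | case9 x hne hna hny h0 h1 hl ih1 =>
      obtain ⟨h3, h2o, h3o⟩ := h1
      rcases x with _ | ⟨c1, _ | ⟨c2, _ | ⟨c3, t⟩⟩⟩ <;> simp at h3 ⊢ <;> try omega
      obtain rfl : c1 = 'w' := by simpa using h0
      rw [pyget_cons_one] at h2o; rw [pyget_cons_two] at h3o
      obtain rfl : c2 = 'o' := by simpa using h2o
      obtain rfl : c3 = 'o' := by simpa using h3o
      rw [slice3_cons] at ih1 ⊢
      simpa [pvGood] using ih1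
  | case10 x hne hna hny h0 h =>
      rcases x with _ | ⟨c1, r⟩
      · exact absurd rfl hne
      obtain rfl : c1 = 'w' := by simpa using h0
      rw [pyget_cons_one, pyget_cons_two] at h
      suffices hg : pvGood ('w'::r) = false by simp [hg]
      apply Bool.eq_false_iff.mpr
      intro hg
      rcases (pvGood_iff _).mp hg with _ | h' | h' | h' | h' <;> simp_all
  | case11 x hne hna hny hnw h0 h1 hl =>
      obtain ⟨h2, ha⟩ := h1
      rcases x with _ | ⟨c1, _ | ⟨c2, t⟩⟩ <;> simp at h2 hl ⊢ <;> try omega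
      obtain rfl : c1 = 'm' := by simpa using h0
      rw [pyget_cons_one] at ha
      obtain rfl : c2 = 'a' := by simpa using ha
      obtain rfl : t = [] := by simpa using hl
      simp [pvALoop, pvGood]
  | case12 x hne hna hny hnw h0 h1 hl ih1 =>
      obtain ⟨h2, ha⟩ := h1
      rcases x with _ | ⟨c1, _ | ⟨c2, t⟩⟩ <;> simp at h2 ⊢ <;> try omega
      obtain rfl : c1 = 'm' := by simpa using h0
      rw [pyget_cons_one] at ha
      obtain rfl : c2 = 'a' := by simpa using ha
      rw [slice2_cons] at ih1 ⊢
      simpa [pvGood] using ih1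
  | case13 x hne hna hny hnw h0 h =>
      rcases x with _ | ⟨c1, r⟩
      · exact absurd rfl hne
      obtain rfl : c1 = 'm' := by simpa using h0
      rw [pyget_cons_one] at h
      suffices hg : pvGood ('m'::r) = false by simp [hg]
      apply Bool.eq_false_iff.mpr
      intro hg
      rcases (pvGood_iff _).mp hg with _ | h' | h' | h' | h' <;> simp_all
  | case14 x hne hna hny hnw hnm =>
      rcases x with _ | ⟨c1, r⟩
      · exact absurd rfl hne
      simp only [PySem.List.pyGet?_zero_cons, Option.some.injEq] at hna hny hnw hnm
      suffices hg : pvGood (c1::r) = false by simp [hg]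
      apply Bool.eq_false_iff.mpr
      intro hg
      rcases (pvGood_iff _).mp hg with _ | h' | h' | h' | h' <;> simp_all

-- B's `any(...)` over the four tokens computes the next DP entry
theorem pvAny_eq (w : List Char) (m : Nat) (hm : m + 1 ≤ w.length) :
    (pvTokens.any (fun t =>
        decide ((t.length : Int) ≤ (m : Int) + 1) &&
        PySem.List.pyGetD ((List.range (m + 1)).map (fun j => pvGood (w.take j))) (((m : Int) + 1) - (t.length : Int)) false &&
        (PySem.List.slice w (some (((m : Int) + 1) - (t.length : Int))) (some ((m : Int) + 1)) == t)))
      = pvGood (w.take (m + 1)) := by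
  rw [Bool.eq_iff_iff]
  simp only [List.any_eq_true, Bool.and_eq_true, decide_eq_true_eq, beq_iff_eq]
  constructor
  · rintro ⟨t, ht, ⟨hL, hok⟩, hsl⟩
    have hL' : t.length ≤ m + 1 := by exact_mod_cast hL
    have h1 : 1 ≤ t.length := by rcases pvToken_len ht with h | h <;> omega
    have hcast : ((m : Int) + 1) - (t.length : Int) = ((m + 1 - t.length : Nat) : Int) := by push_cast; omega
    rw [hcast] at hok hsl
    rw [PySem.List.pyGetD_natCast] at hok
    rw [List.getD_eq_getElem?_getD] at hok
    have hlt : m + 1 - t.length < m + 1 := by omega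
    rw [List.getElem?_map] at hok
    simp [hlt] at hok
    have hm1 : ((m : Int) + 1) = ((m + 1 : Nat) : Int) := by push_cast; ring
    rw [hm1, PySem.List.slice_natCast] at hsl
    have hLL : m + 1 - (m + 1 - t.length) = t.length := by omega
    rw [hLL] at hsl
    rw [pvGood_iff]
    have : w.take (m + 1) = w.take (m + 1 - t.length) ++ ((w.drop (m + 1 - t.length)).take t.length) := by
      rw [← List.take_add]
      congr 1
      omega
    rw [this, hsl]
    exact pvDecomp_append ((pvGood_iff _).mp hok) (pvToken_decomp ht)
  · intro hg
    have hne : w.take (m + 1) ≠ [] := by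
      have : (w.take (m + 1)).length = m + 1 := by simp [List.length_take]; omega
      intro h; rw [h] at this; simp at this
    obtain ⟨u, t, ht, hu, heq⟩ := pvDecomp_peel ((pvGood_iff _).mp hg) hne
    have hlen : u.length + t.length = m + 1 := by
      have := congrArg List.length heq
      simp [List.length_take] at this
      omega
    have h1 : 1 ≤ t.length := by rcases pvToken_len ht with h | h <;> omega
    refine ⟨t, ht, ⟨by exact_mod_cast (by omega : (t.length : Nat) ≤ m + 1), ?_⟩, ?_⟩
    · have hcast : ((m : Int) + 1) - (t.length : Int) = ((m + 1 - t.length : Nat) : Int) := by push_cast; omega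
      rw [hcast, PySem.List.pyGetD_natCast, List.getD_eq_getElem?_getD, List.getElem?_map]
      have hlt : m + 1 - t.length < m + 1 := by omega
      simp [hlt]
      rw [pvGood_iff]
      have hu' : u = w.take (m + 1 - t.length) := by
        have h1' : u = (w.take (m + 1)).take u.length := by
          rw [heq]; simp
        rw [h1', List.take_take]
        congr 1
        omega
      rw [← hu']; exact hu
    · have hcast : ((m : Int) + 1) - (t.length : Int) = ((m + 1 - t.length : Nat) : Int) := by push_cast; omega
      have hm1 : ((m : Int) + 1) = ((m + 1 : Nat) : Int) := by push_cast; ring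
      rw [hcast, hm1, PySem.List.slice_natCast]
      have hLL : m + 1 - (m + 1 - t.length) = t.length := by omega
      rw [hLL]
      have ht' : t = (w.take (m + 1)).drop u.length := by rw [heq]; simp
      rw [List.drop_take] at ht'
      have hul : u.length = m + 1 - t.length := by omega
      conv_rhs => rw [ht']
      rw [hul, hLL]

-- B's table after m iterations is the table of recognizer values on the prefixes
theorem pvFoldl_ok (w : List Char) (m : Nat) (hm : m ≤ w.length) :
    (PySem.List.pyRange 1 ((m : Int) + 1) 1).foldl (pvStep w) [true]
      = (List.range (m + 1)).map (fun j => pvGood (w.take j)) := by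
  induction m with
  | zero =>
    rw [PySem.List.pyRange_one_eq_nil (by norm_num)]
    simp [pvGood]
  | succ m ih =>
    have hm' : m ≤ w.length := by omega
    have hc : ((m + 1 : Nat) : Int) + 1 = ((m : Int) + 1) + 1 := by push_cast; ring
    rw [hc, PySem.List.pyRange_one_succ_right (by omega), List.foldl_append, ih hm']
    simp only [List.foldl_cons, List.foldl_nil, pvStep]
    rw [List.range_succ (n := m + 1), List.map_append]
    congr 1
    rw [pvAny_eq w m hm]
    simp

theorem pvDpWord_eq (w : List Char) : pvDpWord w = pvGood w := by
  show PySem.List.pyGetD ((PySem.List.pyRange 1 ((w.length : Int) + 1) 1).foldl (pvStep w) [true]) (w.length : Int) false = pvGood w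
  rw [pvFoldl_ok w w.length le_rfl]
  rw [PySem.List.pyGetD_natCast, List.getD_eq_getElem?_getD, List.getElem?_map]
  simp

-- ===== VERDICT (by name: the statement is the Claim_ definition above) =====
theorem solution_spec : Claim_equal_solution := by
  intro babbling _
  unfold Spec_solution solution solution_alt
  induction babbling using List.reverseRecOn with
  | nil => rfl
  | append_singleton xs x ih =>
    simp only [List.foldl_append, List.foldl_cons, List.foldl_nil, pvALoop_eq, pvDpWord_eq]
    cases pvGood x.toList <;> simp
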